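-- pv_equiv track=rewrite | github.com/louisyang2015/movie_recommender | python/100k_data/ls_tag.py | convert_ratings_to_list_of_list
-- ===== SOURCE A (Python) =====
-- def convert_ratings_to_list_of_list(movie_ids, ratings):
--     """ Convert information in two lists into a list of lists format
--     that is suitable for rank agreement computation.
--
--     :param movie_ids: a list
--     :param ratings: a list
--     :return: a list that looks like [[movies with 5 stars], [movie with 4 stars], [movies with 3 stars], ...]
--     """
--
--     # collect movie ids into lists, grouped by ratings
--     rating_to_movie_id = {}
--     for i in range(0, len(movie_ids)):
--         movie_id = movie_ids[i]
--         rating = ratings[i]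
--
--         if rating not in rating_to_movie_id:
--             rating_to_movie_id[rating] = []
--
--         rating_to_movie_id[rating].append(movie_id)
--
--     # create a list of lists, sorted by ratings
--     rating_keys = list(rating_to_movie_id.keys())
--     rating_keys.sort(reverse=True)
--
--     list_of_lists = []
--     for rating in rating_keys:
--         list_of_lists.append(rating_to_movie_id[rating])
--
--     return list_of_lists
-- ===== SOURCE B (Python) =====
-- def convert_ratings_to_list_of_list(movie_ids, ratings):
--     """ Convert information in two lists into a list of lists format
--     that is suitable for rank agreement computation.
--
--     :param movie_ids: a list
--     :param ratings: a list
--     :return: a list that looks like [[movies with 5 stars], [movie with 4 stars], [movies with 3 stars], ...]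
--     """
--     pairs = list(zip(movie_ids, ratings))
--
--     # distinct ratings, in order of first appearance
--     distinct_ratings = []
--     for _, r in pairs:
--         if r not in distinct_ratings:
--             distinct_ratings.append(r)
--     distinct_ratings.sort(reverse=True)
--
--     # one filtering pass per distinct rating
--     return [[m for m, r2 in pairs if r2 == r] for r in distinct_ratings]
-- ===== Notes on version B (the rewrite author's own statement) =====
-- stated objective: alternative
-- what changed: Replaces A's dict-of-lists grouping (hash-group then sort the keys) by zipping the two lists, collecting the distinct ratings, sorting them descending and taking one filtering pass over the pairs per rating, with no dict at all.
import Mathlib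
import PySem

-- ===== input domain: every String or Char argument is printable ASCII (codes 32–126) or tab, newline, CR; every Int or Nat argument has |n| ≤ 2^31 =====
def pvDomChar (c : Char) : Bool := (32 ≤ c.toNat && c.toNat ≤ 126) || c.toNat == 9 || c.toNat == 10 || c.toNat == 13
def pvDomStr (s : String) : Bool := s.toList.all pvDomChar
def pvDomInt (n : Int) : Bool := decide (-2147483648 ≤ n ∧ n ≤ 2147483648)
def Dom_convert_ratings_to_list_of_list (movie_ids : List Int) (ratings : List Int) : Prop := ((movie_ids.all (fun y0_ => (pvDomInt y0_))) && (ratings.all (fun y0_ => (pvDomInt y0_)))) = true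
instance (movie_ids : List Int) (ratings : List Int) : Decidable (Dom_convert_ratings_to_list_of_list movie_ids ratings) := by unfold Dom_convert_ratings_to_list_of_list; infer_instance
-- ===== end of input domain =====

-- B replaces A's dict-of-lists grouping by sort-distinct-ratings-then-filter passes (no dict);
-- equal return values are proved on Pre_ (len movie_ids ≤ len ratings; elsewhere A raises IndexError).

-- ===== PORT A =====
-- one iteration of A's grouping loop over i; none threads the IndexError of movie_ids[i] / ratings[i]
def pvAStep (movie_ids ratings : List Int) (acc : Option (PySem.Dict Int (List Int))) (i : Int) :
    Option (PySem.Dict Int (List Int)) :=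
  match acc with
  | none => none
  | some d =>
    match PySem.List.pyGet? movie_ids i, PySem.List.pyGet? ratings i with
    | some movie_id, some rating =>
        -- if rating not in rating_to_movie_id: rating_to_movie_id[rating] = []
        let d := if d.contains rating then d else d.insert rating []
        -- rating_to_movie_id[rating].append(movie_id)
        some (d.modify rating [] (fun l => l ++ [movie_id]))
    | _, _ => none

def convert_ratings_to_list_of_list (movie_ids : List Int) (ratings : List Int) : List (List Int) :=
  match (PySem.List.pyRange 0 (PySem.List.len movie_ids) 1).foldl (pvAStep movie_ids ratings)
      (some PySem.Dict.empty) with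
  | none => []   -- unreachable under Pre_: Python raises IndexError here
  | some rating_to_movie_id =>
    let rating_keys := PySem.List.sorted (PySem.Dict.keys rating_to_movie_id) (fun x => x) true
    rating_keys.foldl (fun list_of_lists rating =>
      list_of_lists ++ [PySem.Dict.getD rating_to_movie_id rating []]) []

-- ===== PORT B =====
def convert_ratings_to_list_of_list_alt (movie_ids : List Int) (ratings : List Int) : List (List Int) :=
  let pairs := movie_ids.zip ratings
  -- distinct ratings in first-appearance order
  let distinct_ratings := pairs.foldl (fun s p => PySem.Set.add s p.2) PySem.Set.empty
  let sorted_ratings := PySem.List.sorted distinct_ratings (fun x => x) true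
  sorted_ratings.map (fun r => (pairs.filter (fun p => p.2 == r)).map Prod.fst)

-- ===== PRECONDITION & SPEC =====
-- Pre_ excludes exactly the inputs with len(ratings) < len(movie_ids), on which A raises IndexError at ratings[i]
def Pre_convert_ratings_to_list_of_list (movie_ids : List Int) (ratings : List Int) : Prop :=
  movie_ids.length ≤ ratings.length
instance (movie_ids : List Int) (ratings : List Int) : Decidable (Pre_convert_ratings_to_list_of_list movie_ids ratings) := by unfold Pre_convert_ratings_to_list_of_list; infer_instance

def pvWitness_convert_ratings_to_list_of_list : List Int × List Int := ([1, 2, 3], [5, 4, 5])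

def Spec_convert_ratings_to_list_of_list (movie_ids : List Int) (ratings : List Int) (out : List (List Int)) : Prop := out = convert_ratings_to_list_of_list_alt movie_ids ratings
instance (movie_ids : List Int) (ratings : List Int) (out : List (List Int)) : Decidable (Spec_convert_ratings_to_list_of_list movie_ids ratings out) := by unfold Spec_convert_ratings_to_list_of_list; infer_instance

-- ===== CLAIM (what is proved, stated in full; the proofs are below) =====
def Claim_equal_convert_ratings_to_list_of_list : Prop := ∀ (movie_ids : List Int) (ratings : List Int), Dom_convert_ratings_to_list_of_list movie_ids ratings → Pre_convert_ratings_to_list_of_list movie_ids ratings → Spec_convert_ratings_to_list_of_list movie_ids ratings (convert_ratings_to_list_of_list movie_ids ratings)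

-- ===== LEMMAS AND PROOFS =====

-- the zip-level form of A's loop body, once the index reads have succeeded
def pvZStep (d : PySem.Dict Int (List Int)) (p : Int × Int) : PySem.Dict Int (List Int) :=
  (if d.contains p.2 then d else d.insert p.2 []).modify p.2 [] (fun l => l ++ [p.1])

-- keys after one zip step: first-insertion append, i.e. Set.add
lemma pvKeys_zstep (d : PySem.Dict Int (List Int)) (p : Int × Int) :
    (pvZStep d p).keys = PySem.Set.add (PySem.Dict.keys d) p.2 := by
  unfold pvZStep
  by_cases h : d.contains p.2 = true
  · simp [PySem.Dict.keys_modify, PySem.Dict.keys_insert_of_contains _ _ h, PySem.Set.add,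
      PySem.Set.contains, ← PySem.Dict.contains_iff_mem_keys, h]
  · simp only [Bool.not_eq_true] at h
    simp [PySem.Dict.keys_modify, PySem.Dict.keys_insert_of_not_contains _ _ h,
      PySem.Dict.contains_insert_self, PySem.Dict.keys_insert_of_contains, PySem.Set.add,
      PySem.Set.contains, ← PySem.Dict.contains_iff_mem_keys, h]

-- lookup after one zip step
lemma pvGetD_zstep (d : PySem.Dict Int (List Int)) (p : Int × Int) (c : Int) :
    (pvZStep d p).getD c [] = if c = p.2 then d.getD p.2 [] ++ [p.1] else d.getD c [] := by
  unfold pvZStep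
  by_cases h : d.contains p.2 = true
  · simp [h, PySem.Dict.getD_modify]
  · simp only [Bool.not_eq_true] at h
    simp [h, PySem.Dict.getD_modify, PySem.Dict.getD_insert,
      PySem.Dict.getD_of_not_contains _ _ h]
    by_cases hc : c = p.2 <;> simp [hc]

lemma pvKeys_zloop (l : List (Int × Int)) (d : PySem.Dict Int (List Int)) :
    (l.foldl pvZStep d).keys = (l.map Prod.snd).foldl PySem.Set.add (PySem.Dict.keys d) := by
  induction l generalizing d with
  | nil => rfl
  | cons p t ih => simp [List.foldl_cons, ih, pvKeys_zstep]

lemma pvGetD_zloop (l : List (Int × Int)) (d : PySem.Dict Int (List Int)) (c : Int) :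
    (l.foldl pvZStep d).getD c [] = d.getD c [] ++ ((l.filter (fun p => p.2 == c)).map Prod.fst) := by
  induction l generalizing d with
  | nil => simp
  | cons p t ih =>
    simp only [List.foldl_cons, ih, pvGetD_zstep, List.filter_cons]
    by_cases h : c = p.2
    · simp [h]
    · have h2 : p.2 ≠ c := fun hh => h hh.symm
      simp [h, h2]

-- A's index loop equals the zip-level loop when movie_ids.length ≤ ratings.length
lemma pvALoop (movie_ids ratings : List Int) (h : movie_ids.length ≤ ratings.length)
    (n : Nat) (hn : n ≤ movie_ids.length) (d : PySem.Dict Int (List Int)) :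
    (PySem.List.pyRange 0 (n : Int) 1).foldl (pvAStep movie_ids ratings) (some d)
      = some (((movie_ids.zip ratings).take n).foldl pvZStep d) := by
  induction n generalizing d with
  | zero => simp [PySem.List.pyRange_one_eq_nil]
  | succ n ih =>
    have hlt : n < movie_ids.length := hn
    have hr : n < ratings.length := lt_of_lt_of_le hlt h
    have hz : n < (movie_ids.zip ratings).length := by simp [List.length_zip]; omega
    have hcast : ((n : Int) + 1) = ((n + 1 : Nat) : Int) := by push_cast; ring
    rw [← hcast, PySem.List.pyRange_one_succ_right (by positivity), List.foldl_append,
      ih (le_of_lt hlt)]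
    have hstep : pvAStep movie_ids ratings
        (some (((movie_ids.zip ratings).take n).foldl pvZStep d)) (n : Int)
        = some (pvZStep (((movie_ids.zip ratings).take n).foldl pvZStep d)
            (movie_ids[n], ratings[n])) := by
      simp [pvAStep, PySem.List.pyGet?_natCast, List.getElem?_eq_getElem hlt,
        List.getElem?_eq_getElem hr, pvZStep]
    rw [List.foldl_cons, List.foldl_nil, hstep]
    rw [List.take_add_one, List.getElem?_eq_getElem hz, List.getElem_zip]
    simp

-- ===== VERDICT (by name: the statement is the Claim_ definition above) =====
theorem convert_ratings_to_list_of_list_spec : Claim_equal_convert_ratings_to_list_of_list := by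
  intro movie_ids ratings _ hpre
  unfold Spec_convert_ratings_to_list_of_list
  unfold Pre_convert_ratings_to_list_of_list at hpre
  unfold convert_ratings_to_list_of_list convert_ratings_to_list_of_list_alt
  have hz : (movie_ids.zip ratings).take movie_ids.length = movie_ids.zip ratings := by
    apply List.take_of_length_le; simp [List.length_zip]
  rw [show PySem.List.len movie_ids = (movie_ids.length : Int) from PySem.List.len_eq movie_ids,
    pvALoop movie_ids ratings hpre movie_ids.length (le_refl _) PySem.Dict.empty, hz]
  have hkeys : (((movie_ids.zip ratings)).foldl pvZStep PySem.Dict.empty).keys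
      = (movie_ids.zip ratings).foldl (fun s p => PySem.Set.add s p.2) PySem.Set.empty := by
    rw [pvKeys_zloop]
    simp [PySem.Dict.keys_empty, PySem.Set.empty, List.foldl_map]
  simp only [PySem.List.foldl_append_singleton_eq_map, List.nil_append, hkeys]
  apply List.map_congr_left
  intro r _
  rw [pvGetD_zloop]
  simp [PySem.Dict.getD_empty]
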